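-- pv_equiv track=rewrite | github.com/parkgeon0726/- | 4.9 클래스도전 문제.py | solve_stair_climbing
-- ===== SOURCE A (Python) =====
-- def solve_stair_climbing(n, stairs):
--     # 계단이 1개인 경우는 바로 결과 반환
--     if n == 1:
--         return stairs[1]
--     # dp[i]: i번째 계단까지의 최대 점수
--     dp = [0] * (n + 1)
--     # 초기값 설정
--     dp[1] = stairs[1]
--     dp[2] = stairs[1] + stairs[2]
--     # 3번째 계단부터 DP 진행
--     for i in range(3, n + 1):
--         dp[i] = max(dp[i-2] + stairs[i], dp[i-3] + stairs[i-1] + stairs[i])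
--     return dp[n]
-- ===== SOURCE B (Python) =====
-- def solve_stair_climbing(n, stairs):
--     # Demand-driven top-down evaluation: a dict memo plus an explicit work
--     # stack replaces A's bottom-up dp array fill.
--     if n == 1:
--         return stairs[1]
--     memo = {0: 0, 1: stairs[1], 2: stairs[1] + stairs[2]}
--     stack = [n]
--     while stack:
--         i = stack[-1]
--         if i in memo:
--             stack.pop()
--         elif i - 2 in memo and i - 3 in memo:
--             memo[i] = max(memo[i - 2] + stairs[i],
--                           memo[i - 3] + stairs[i - 1] + stairs[i])
--             stack.pop()
--         else:
--             if i - 2 not in memo: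
--                 stack.append(i - 2)
--             if i - 3 not in memo:
--                 stack.append(i - 3)
--     return memo[n]
-- ===== Notes on version B (the rewrite author's own statement) =====
-- stated objective: alternative
-- what changed: Replaces A's bottom-up dp-array fill over range(3,n+1) with demand-driven top-down evaluation: a dict memo seeded with the base cases and an explicit work stack that pops an index, resolves it from its memoized dependencies or pushes the missing dependencies, starting from n.
import Mathlib
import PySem

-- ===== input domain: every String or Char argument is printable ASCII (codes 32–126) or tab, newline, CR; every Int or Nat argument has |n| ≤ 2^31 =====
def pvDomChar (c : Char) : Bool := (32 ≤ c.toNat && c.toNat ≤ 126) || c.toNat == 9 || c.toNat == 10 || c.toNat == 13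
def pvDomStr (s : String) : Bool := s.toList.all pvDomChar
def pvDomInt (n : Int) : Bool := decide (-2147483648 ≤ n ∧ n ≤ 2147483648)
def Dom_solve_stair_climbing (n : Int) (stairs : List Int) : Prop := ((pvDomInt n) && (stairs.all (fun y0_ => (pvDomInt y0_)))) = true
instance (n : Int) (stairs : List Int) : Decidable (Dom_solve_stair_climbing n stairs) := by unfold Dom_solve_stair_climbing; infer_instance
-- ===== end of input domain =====

-- B replaces A's bottom-up dp-array fill with demand-driven top-down evaluation
-- using a dict memo and an explicit work stack (same O(n) cost, different traversal).

-- ===== PORT A =====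
def solve_stair_climbing (n : Int) (stairs : List Int) : Int :=
  if n = 1 then PySem.List.pyGetD stairs 1 0
  else
    -- dp = [0] * (n + 1)
    let dp := PySem.List.pyRepeat [(0 : Int)] (n + 1)
    -- dp[1] = stairs[1]; dp[2] = stairs[1] + stairs[2]
    let dp := PySem.List.pySetD dp 1 (PySem.List.pyGetD stairs 1 0)
    let dp := PySem.List.pySetD dp 2
      (PySem.List.pyGetD stairs 1 0 + PySem.List.pyGetD stairs 2 0)
    -- for i in range(3, n+1): dp[i] = max(dp[i-2]+stairs[i], dp[i-3]+stairs[i-1]+stairs[i])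
    let dp := (PySem.List.pyRange 3 (n + 1) 1).foldl (fun dp i =>
      PySem.List.pySetD dp i
        (max (PySem.List.pyGetD dp (i - 2) 0 + PySem.List.pyGetD stairs i 0)
             (PySem.List.pyGetD dp (i - 3) 0 + PySem.List.pyGetD stairs (i - 1) 0
              + PySem.List.pyGetD stairs i 0))) dp
    PySem.List.pyGetD dp n 0

-- ===== PORT B =====
-- Source B's while-loop over (memo, stack); the Lean stack holds the TOP at the HEAD
-- (Python appends i-2 then i-3 at the end of the list, so i-3 is on top = first here).
-- Fuel only makes the while-loop total; inside Pre_ it is proved sufficient.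
def runB (stairs : List Int) : Nat → PySem.Dict Int Int → List Int → PySem.Dict Int Int
  | 0, m, _ => m
  | _ + 1, m, [] => m
  | f + 1, m, i :: st =>
    if m.contains i then runB stairs f m st
    else if m.contains (i - 2) && m.contains (i - 3) then
      runB stairs f
        (m.insert i (max (m.getD (i - 2) 0 + PySem.List.pyGetD stairs i 0)
                         (m.getD (i - 3) 0 + PySem.List.pyGetD stairs (i - 1) 0
                          + PySem.List.pyGetD stairs i 0))) st
    else
      runB stairs f m
        ((if m.contains (i - 3) then [] else [i - 3])
          ++ (if m.contains (i - 2) then [] else [i - 2]) ++ i :: st)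

def solve_stair_climbing_alt (n : Int) (stairs : List Int) : Int :=
  if n = 1 then PySem.List.pyGetD stairs 1 0
  else
    -- memo = {0: 0, 1: stairs[1], 2: stairs[1] + stairs[2]}
    let memo := ((PySem.Dict.empty.insert 0 0).insert 1 (PySem.List.pyGetD stairs 1 0)).insert 2
      (PySem.List.pyGetD stairs 1 0 + PySem.List.pyGetD stairs 2 0)
    -- while stack: … ;  return memo[n]
    (runB stairs (4 * (n + 1) + 8).toNat memo [n]).getD n 0

-- ===== PRECONDITION & SPEC =====
-- Pre_ excludes exactly the inputs where Python A raises an IndexError: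
-- n ≤ 0 (dp[1]/dp[2] assignment out of range), or stairs too short for the indices read.
def Pre_solve_stair_climbing (n : Int) (stairs : List Int) : Prop :=
  (n = 1 ∧ 2 ≤ stairs.length) ∨ (2 ≤ n ∧ n + 1 ≤ (stairs.length : Int))
instance (n : Int) (stairs : List Int) : Decidable (Pre_solve_stair_climbing n stairs) := by
  unfold Pre_solve_stair_climbing; infer_instance
def pvWitness_solve_stair_climbing : Int × List Int := (3, [0, 10, 20, 15])

def Spec_solve_stair_climbing (n : Int) (stairs : List Int) (out : Int) : Prop := out = solve_stair_climbing_alt n stairs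
instance (n : Int) (stairs : List Int) (out : Int) : Decidable (Spec_solve_stair_climbing n stairs out) := by unfold Spec_solve_stair_climbing; infer_instance

-- ===== CLAIM (what is proved, stated in full; the proofs are below) =====
def Claim_equal_solve_stair_climbing : Prop := ∀ (n : Int) (stairs : List Int), Dom_solve_stair_climbing n stairs → Pre_solve_stair_climbing n stairs → Spec_solve_stair_climbing n stairs (solve_stair_climbing n stairs)

-- ===== LEMMAS AND PROOFS =====

-- stairs[i] as both ports read it (total form)
def sAt (stairs : List Int) (i : Nat) : Int := PySem.List.pyGetD stairs (i : Int) 0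

-- reference recurrence, exactly A's dp values
def fRef (stairs : List Int) : Nat → Int
  | 0 => 0
  | 1 => sAt stairs 1
  | 2 => sAt stairs 1 + sAt stairs 2
  | (i + 3) => max (fRef stairs (i + 1) + sAt stairs (i + 3))
                   (fRef stairs i + sAt stairs (i + 2) + sAt stairs (i + 3))

-- loop invariant for B's memo: distinct keys, bases present, every entry is fRef
def InvB (stairs : List Int) (m : PySem.Dict Int Int) : Prop :=
  m.keys.Nodup ∧ m.contains 0 = true ∧ m.contains 1 = true ∧ m.contains 2 = true ∧
  ∀ j v, m.get? j = some v → ∃ jn : Nat, j = (jn : Int) ∧ v = fRef stairs jn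

lemma runB_nil (stairs : List Int) (f : Nat) (m : PySem.Dict Int Int) :
    runB stairs f m [] = m := by cases f <;> simp [runB]

lemma contains_some {m : PySem.Dict Int Int} {j : Int} (h : m.contains j = true) :
    ∃ v, m.get? j = some v := by
  rw [PySem.Dict.contains_eq_isSome_get?] at h
  exact Option.isSome_iff_exists.mp h

lemma invB_getD (stairs : List Int) (m : PySem.Dict Int Int) (hm : InvB stairs m)
    (jn : Nat) (h : m.contains ((jn : Nat) : Int) = true) :
    m.getD ((jn : Nat) : Int) 0 = fRef stairs jn := by
  obtain ⟨v, hv⟩ := contains_some h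
  obtain ⟨j', hj', hv'⟩ := hm.2.2.2.2 _ _ hv
  have hj : j' = jn := by exact_mod_cast hj'.symm
  subst hj
  rw [PySem.Dict.getD_eq_get?_getD, hv, hv']
  rfl

-- one computing step: top of stack is i3+3, unresolved, both dependencies memoized
lemma stepCompute (stairs : List Int) (i3 : Nat) (m : PySem.Dict Int Int)
    (hm : InvB stairs m)
    (hci : m.contains ((i3 + 3 : Nat) : Int) = false)
    (hc2 : m.contains (((i3 + 3 : Nat) : Int) - 2) = true)
    (hc3 : m.contains (((i3 + 3 : Nat) : Int) - 3) = true) :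
    (∀ st f, runB stairs (f + 1) m (((i3 + 3 : Nat) : Int) :: st)
       = runB stairs f (m.insert ((i3 + 3 : Nat) : Int) (fRef stairs (i3 + 3))) st) ∧
    InvB stairs (m.insert ((i3 + 3 : Nat) : Int) (fRef stairs (i3 + 3))) ∧
    (m.insert ((i3 + 3 : Nat) : Int) (fRef stairs (i3 + 3))).size = m.size + 1 := by
  have e2 : (((i3 + 3 : Nat) : Int) - 2) = ((i3 + 1 : Nat) : Int) := by push_cast; ring
  have e3 : (((i3 + 3 : Nat) : Int) - 3) = ((i3 : Nat) : Int) := by push_cast; ring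
  have e1 : (((i3 + 3 : Nat) : Int) - 1) = ((i3 + 2 : Nat) : Int) := by push_cast; ring
  have g2 : m.getD (((i3 + 3 : Nat) : Int) - 2) 0 = fRef stairs (i3 + 1) := by
    rw [e2]; exact invB_getD stairs m hm _ (by rw [← e2]; exact hc2)
  have g3 : m.getD (((i3 + 3 : Nat) : Int) - 3) 0 = fRef stairs i3 := by
    rw [e3]; exact invB_getD stairs m hm _ (by rw [← e3]; exact hc3)
  have hval : max (m.getD (((i3 + 3 : Nat) : Int) - 2) 0 + PySem.List.pyGetD stairs ((i3 + 3 : Nat) : Int) 0)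
      (m.getD (((i3 + 3 : Nat) : Int) - 3) 0 + PySem.List.pyGetD stairs (((i3 + 3 : Nat) : Int) - 1) 0
       + PySem.List.pyGetD stairs ((i3 + 3 : Nat) : Int) 0) = fRef stairs (i3 + 3) := by
    rw [g2, g3, e1]
    show max (fRef stairs (i3 + 1) + sAt stairs (i3 + 3))
        (fRef stairs i3 + sAt stairs (i3 + 2) + sAt stairs (i3 + 3)) = fRef stairs (i3 + 3)
    rw [fRef]
  refine ⟨?_, ?_, ?_⟩
  · intro st f
    simp only [runB, hci, Bool.false_eq_true, if_false, hc2, hc3, Bool.and_self, if_true, hval]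
  · obtain ⟨hnd, h0, h1, h2, hall⟩ := hm
    refine ⟨PySem.Dict.nodup_keys_insert _ _ _ hnd, ?_, ?_, ?_, ?_⟩
    · rw [PySem.Dict.contains_insert]; simp [h0]
    · rw [PySem.Dict.contains_insert]; simp [h1]
    · rw [PySem.Dict.contains_insert]; simp [h2]
    · intro j v hv
      rw [PySem.Dict.get?_insert] at hv
      by_cases hji : j = ((i3 + 3 : Nat) : Int)
      · rw [if_pos hji] at hv
        exact ⟨i3 + 3, hji, by injection hv with h; exact h.symm⟩
      · rw [if_neg hji] at hv
        exact hall j v hv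
  · rw [PySem.Dict.size_insert, hci]; simp

-- resolution: from any invariant memo the loop pops i off the stack, leaving i
-- memoized, within a fuel budget of 4·(memo growth)+1 steps (amortized bound)
lemma resolveB (stairs : List Int) (i : Nat) :
    ∀ m, InvB stairs m →
    ∃ k m', (∀ st f, runB stairs (k + f) m ((i : Int) :: st) = runB stairs f m' st) ∧
      InvB stairs m' ∧
      m'.contains (i : Int) = true ∧
      (∀ j : Int, m.contains j = true → m'.contains j = true) ∧
      (∀ j : Int, m'.contains j = true → m.contains j = true ∨ (0 ≤ j ∧ j ≤ (i : Int))) ∧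
      k + 4 * m.size ≤ 1 + 4 * m'.size ∧ m.size ≤ m'.size := by
  induction i using Nat.strong_induction_on with
  | _ i ih =>
    intro m hm
    by_cases hcit : m.contains (i : Int) = true
    · -- memo hit: one popping step
      refine ⟨1, m, ?_, hm, hcit, fun j h => h, fun j h => Or.inl h, by omega, le_rfl⟩
      intro st f
      rw [Nat.add_comm]
      simp [runB, hcit]
    · have hci : m.contains (i : Int) = false := by
        cases h : m.contains (i : Int) with
        | true => exact absurd h hcit
        | false => rfl
      -- i is unresolved, hence i ≥ 3 (bases 0,1,2 are always memoized)
      obtain ⟨i3, rfl⟩ : ∃ i3, i = i3 + 3 := by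
        rcases Nat.lt_or_ge i 3 with h | h
        · interval_cases i
          · exact absurd hm.2.1 hcit
          · exact absurd hm.2.2.1 hcit
          · exact absurd hm.2.2.2.1 hcit
        · exact ⟨i - 3, by omega⟩
      have e2 : (((i3 + 3 : Nat) : Int) - 2) = ((i3 + 1 : Nat) : Int) := by push_cast; ring
      have e3 : (((i3 + 3 : Nat) : Int) - 3) = ((i3 : Nat) : Int) := by push_cast; ring
      by_cases hdeps : (m.contains (((i3 + 3 : Nat) : Int) - 2) && m.contains (((i3 + 3 : Nat) : Int) - 3)) = true
      · -- both dependencies present: one computing step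
        have hc2 := ((Bool.and_eq_true _ _).mp hdeps).1
        have hc3 := ((Bool.and_eq_true _ _).mp hdeps).2
        obtain ⟨hstep, hinv, hsz⟩ := stepCompute stairs i3 m hm hci hc2 hc3
        refine ⟨1, _, ?_, hinv, PySem.Dict.contains_insert_self _ _ _, ?_, ?_, by omega, by omega⟩
        · intro st f; rw [Nat.add_comm]; exact hstep st f
        · intro j h; rw [PySem.Dict.contains_insert]; simp [h]
        · intro j h
          rw [PySem.Dict.contains_insert] at h
          rcases (Bool.or_eq_true _ _).mp h with h | h
          · have hj : j = ((i3 + 3 : Nat) : Int) := by exact_mod_cast eq_of_beq h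
            right; subst hj; exact ⟨by positivity, le_refl _⟩
          · exact Or.inl h
      · -- some dependency missing: push step, resolve pushed deps (strong IH), compute
        have hdf : (m.contains (((i3 + 3 : Nat) : Int) - 2) && m.contains (((i3 + 3 : Nat) : Int) - 3)) = false := by
          cases h : (m.contains (((i3 + 3 : Nat) : Int) - 2) && m.contains (((i3 + 3 : Nat) : Int) - 3)) with
          | true => exact absurd h hdeps
          | false => rfl
        have hpush : ∀ st f, runB stairs (f + 1) m (((i3 + 3 : Nat) : Int) :: st)
            = runB stairs f m
              ((if m.contains (((i3 + 3 : Nat) : Int) - 3) then [] else [(((i3 + 3 : Nat) : Int) - 3)])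
                ++ (if m.contains (((i3 + 3 : Nat) : Int) - 2) then [] else [(((i3 + 3 : Nat) : Int) - 2)])
                ++ ((i3 + 3 : Nat) : Int) :: st) := by
          intro st f
          simp only [runB, hci, Bool.false_eq_true, if_false, hdf]
        cases hc2 : m.contains (((i3 + 3 : Nat) : Int) - 2) with
        | false =>
          cases hc3 : m.contains (((i3 + 3 : Nat) : Int) - 3) with
          | false =>
            -- both missing: push i-2 then i-3; resolve i3, then i3+1, then compute
            obtain ⟨k3, m1, h3step, h3inv, h3cont, h3mono, h3sub, h3bd, h3sz⟩ := ih i3 (by omega) m hm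
            obtain ⟨k2, m2, h2step, h2inv, h2cont, h2mono, h2sub, h2bd, h2sz⟩ := ih (i3 + 1) (by omega) m1 h3inv
            have hciM2 : m2.contains ((i3 + 3 : Nat) : Int) = false := by
              cases h : m2.contains ((i3 + 3 : Nat) : Int) with
              | false => rfl
              | true =>
                rcases h2sub _ h with h' | ⟨_, hle⟩
                · rcases h3sub _ h' with h'' | ⟨_, hle⟩
                  · rw [hci] at h''; exact absurd h'' (by simp)
                  · exfalso; push_cast at hle; omega
                · exfalso; push_cast at hle; omega
            have hc2' : m2.contains (((i3 + 3 : Nat) : Int) - 2) = true := by rw [e2]; exact h2cont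
            have hc3' : m2.contains (((i3 + 3 : Nat) : Int) - 3) = true := by
              rw [e3]; exact h2mono _ h3cont
            obtain ⟨hstep, hinv, hsz⟩ := stepCompute stairs i3 m2 h2inv hciM2 hc2' hc3'
            refine ⟨(k3 + k2 + 2), _, ?_, hinv, PySem.Dict.contains_insert_self _ _ _, ?_, ?_, by omega, by omega⟩
            · intro st f
              have harith : k3 + k2 + 2 + f = (k3 + (k2 + (1 + f))) + 1 := by omega
              rw [harith, hpush]
              have hstack : ((if m.contains (((i3 + 3 : Nat) : Int) - 3) then ([] : List Int) else [(((i3 + 3 : Nat) : Int) - 3)])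
                  ++ (if m.contains (((i3 + 3 : Nat) : Int) - 2) then ([] : List Int) else [(((i3 + 3 : Nat) : Int) - 2)])
                  ++ ((i3 + 3 : Nat) : Int) :: st)
                  = ((i3 : Nat) : Int) :: ((i3 + 1 : Nat) : Int) :: ((i3 + 3 : Nat) : Int) :: st := by
                simp only [hc2, hc3, Bool.false_eq_true, if_false, List.cons_append, List.nil_append]
                rw [e2, e3]
              rw [hstack, h3step, h2step]
              rw [show 1 + f = f + 1 from Nat.add_comm 1 f, hstep]
            · intro j h
              rw [PySem.Dict.contains_insert]
              simp [h2mono _ (h3mono _ h)]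
            · intro j h
              rw [PySem.Dict.contains_insert] at h
              rcases (Bool.or_eq_true _ _).mp h with h | h
              · have hj : j = ((i3 + 3 : Nat) : Int) := by exact_mod_cast eq_of_beq h
                right; subst hj; exact ⟨by positivity, le_refl _⟩
              · rcases h2sub _ h with h' | ⟨h0, hle⟩
                · rcases h3sub _ h' with h'' | ⟨h0, hle⟩
                  · exact Or.inl h''
                  · right; refine ⟨h0, ?_⟩; push_cast at hle ⊢; omega
                · right; refine ⟨h0, ?_⟩; push_cast at hle ⊢; omega
          | true =>
            -- only i-2 missing: push i-2; resolve i3+1, then compute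
            obtain ⟨k2, m1, h2step, h2inv, h2cont, h2mono, h2sub, h2bd, h2sz⟩ := ih (i3 + 1) (by omega) m hm
            have hciM1 : m1.contains ((i3 + 3 : Nat) : Int) = false := by
              cases h : m1.contains ((i3 + 3 : Nat) : Int) with
              | false => rfl
              | true =>
                rcases h2sub _ h with h' | ⟨_, hle⟩
                · rw [hci] at h'; exact absurd h' (by simp)
                · exfalso; push_cast at hle; omega
            have hc2' : m1.contains (((i3 + 3 : Nat) : Int) - 2) = true := by rw [e2]; exact h2cont
            obtain ⟨hstep, hinv, hsz⟩ := stepCompute stairs i3 m1 h2inv hciM1 hc2' (h2mono _ hc3)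
            refine ⟨(k2 + 2), _, ?_, hinv, PySem.Dict.contains_insert_self _ _ _, ?_, ?_, by omega, by omega⟩
            · intro st f
              have harith : k2 + 2 + f = (k2 + (1 + f)) + 1 := by omega
              rw [harith, hpush]
              have hstack : ((if m.contains (((i3 + 3 : Nat) : Int) - 3) then ([] : List Int) else [(((i3 + 3 : Nat) : Int) - 3)])
                  ++ (if m.contains (((i3 + 3 : Nat) : Int) - 2) then ([] : List Int) else [(((i3 + 3 : Nat) : Int) - 2)])
                  ++ ((i3 + 3 : Nat) : Int) :: st)
                  = ((i3 + 1 : Nat) : Int) :: ((i3 + 3 : Nat) : Int) :: st := by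
                simp only [hc2, hc3, Bool.false_eq_true, if_false, if_true, List.cons_append, List.nil_append]
                rw [e2]
              rw [hstack, h2step]
              rw [show 1 + f = f + 1 from Nat.add_comm 1 f, hstep]
            · intro j h
              rw [PySem.Dict.contains_insert]
              simp [h2mono _ h]
            · intro j h
              rw [PySem.Dict.contains_insert] at h
              rcases (Bool.or_eq_true _ _).mp h with h | h
              · have hj : j = ((i3 + 3 : Nat) : Int) := by exact_mod_cast eq_of_beq h
                right; subst hj; exact ⟨by positivity, le_refl _⟩
              · rcases h2sub _ h with h' | ⟨h0, hle⟩
                · exact Or.inl h'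
                · right; refine ⟨h0, ?_⟩; push_cast at hle ⊢; omega
        | true =>
          -- i-2 present, so i-3 missing: push i-3; resolve i3, then compute
          have hc3 : m.contains (((i3 + 3 : Nat) : Int) - 3) = false := by
            cases h : m.contains (((i3 + 3 : Nat) : Int) - 3) with
            | false => rfl
            | true => exact absurd (by rw [hc2, h]; rfl) hdeps
          obtain ⟨k3, m1, h3step, h3inv, h3cont, h3mono, h3sub, h3bd, h3sz⟩ := ih i3 (by omega) m hm
          have hciM1 : m1.contains ((i3 + 3 : Nat) : Int) = false := by
            cases h : m1.contains ((i3 + 3 : Nat) : Int) with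
            | false => rfl
            | true =>
              rcases h3sub _ h with h' | ⟨_, hle⟩
              · rw [hci] at h'; exact absurd h' (by simp)
              · exfalso; push_cast at hle; omega
          have hc3' : m1.contains (((i3 + 3 : Nat) : Int) - 3) = true := by rw [e3]; exact h3cont
          obtain ⟨hstep, hinv, hsz⟩ := stepCompute stairs i3 m1 h3inv hciM1 (h3mono _ hc2) hc3'
          refine ⟨(k3 + 2), _, ?_, hinv, PySem.Dict.contains_insert_self _ _ _, ?_, ?_, by omega, by omega⟩
          · intro st f
            have harith : k3 + 2 + f = (k3 + (1 + f)) + 1 := by omega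
            rw [harith, hpush]
            have hstack : ((if m.contains (((i3 + 3 : Nat) : Int) - 3) then ([] : List Int) else [(((i3 + 3 : Nat) : Int) - 3)])
                ++ (if m.contains (((i3 + 3 : Nat) : Int) - 2) then ([] : List Int) else [(((i3 + 3 : Nat) : Int) - 2)])
                ++ ((i3 + 3 : Nat) : Int) :: st)
                = ((i3 : Nat) : Int) :: ((i3 + 3 : Nat) : Int) :: st := by
              simp only [hc2, hc3, Bool.false_eq_true, if_false, if_true, List.cons_append, List.nil_append]
              rw [e3]
            rw [hstack, h3step]
            rw [show 1 + f = f + 1 from Nat.add_comm 1 f, hstep]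
          · intro j h
            rw [PySem.Dict.contains_insert]
            simp [h3mono _ h]
          · intro j h
            rw [PySem.Dict.contains_insert] at h
            rcases (Bool.or_eq_true _ _).mp h with h | h
            · have hj : j = ((i3 + 3 : Nat) : Int) := by exact_mod_cast eq_of_beq h
              right; subst hj; exact ⟨by positivity, le_refl _⟩
            · rcases h3sub _ h with h' | ⟨h0, hle⟩
              · exact Or.inl h'
              · right; refine ⟨h0, ?_⟩; push_cast at hle ⊢; omega

-- a Nodup list of integers inside [0, N] has at most N+1 elements
lemma nodup_length_le (l : List Int) (N : Nat) (hnd : l.Nodup)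
    (hb : ∀ j ∈ l, 0 ≤ j ∧ j ≤ (N : Int)) : l.length ≤ N + 1 := by
  have hcard : l.toFinset.card = l.length := List.toFinset_card_of_nodup hnd
  have hsub : l.toFinset ⊆ Finset.Icc (0 : Int) (N : Int) := by
    intro j hj
    rw [List.mem_toFinset] at hj
    rcases hb j hj with ⟨h1, h2⟩
    exact Finset.mem_Icc.mpr ⟨h1, h2⟩
  have := Finset.card_le_card hsub
  rw [hcard, Int.card_Icc] at this
  omega

-- ===== A-side machinery (unchanged characterization of A's dp array) =====
lemma aLoop (stairs : List Int) (n : Int) (hn : 2 ≤ n) (m : Nat) (hm : ((m + 2 : Nat) : Int) ≤ n) :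
    let dp0 := PySem.List.pySetD
      (PySem.List.pySetD (PySem.List.pyRepeat [(0 : Int)] (n + 1)) 1 (PySem.List.pyGetD stairs 1 0)) 2
      (PySem.List.pyGetD stairs 1 0 + PySem.List.pyGetD stairs 2 0)
    let dp := (PySem.List.pyRange 3 ((m + 2 : Nat) + 1) 1).foldl (fun dp i =>
      PySem.List.pySetD dp i
        (max (PySem.List.pyGetD dp (i - 2) 0 + PySem.List.pyGetD stairs i 0)
             (PySem.List.pyGetD dp (i - 3) 0 + PySem.List.pyGetD stairs (i - 1) 0
              + PySem.List.pyGetD stairs i 0))) dp0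
    dp.length = (n + 1).toNat ∧ ∀ j : Nat, j ≤ m + 2 → dp[j]? = some (fRef stairs j) := by
  have hL : 3 ≤ (n + 1).toNat := by omega
  induction m with
  | zero =>
    have h30 : ((0 + 2 : Nat) : Int) + 1 = 3 := by norm_num
    dsimp only
    rw [h30, PySem.List.pyRange_one_eq_nil (by norm_num), List.foldl_nil]
    constructor
    · simp [PySem.List.pySetD_of_nonneg, PySem.List.pyRepeat_singleton]
    · intro j hj
      interval_cases j <;>
        simp [PySem.List.pySetD_of_nonneg, PySem.List.pyRepeat_singleton,
          List.getElem?_set, List.getElem?_replicate, fRef, sAt] <;> omega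
  | succ m ih =>
    have hm' : ((m + 2 : Nat) : Int) ≤ n := by push_cast at hm ⊢; omega
    obtain ⟨hlen, hget⟩ := ih hm'
    have hsplit : PySem.List.pyRange 3 (((m + 1 + 2 : Nat) : Int) + 1) 1
        = PySem.List.pyRange 3 (((m + 2 : Nat) : Int) + 1) 1 ++ [((m + 2 : Nat) : Int) + 1] := by
      have h := PySem.List.pyRange_one_succ_right (a := 3) (b := ((m + 2 : Nat) : Int) + 1)
        (by push_cast; omega)
      have hc : ((m + 1 + 2 : Nat) : Int) + 1 = (((m + 2 : Nat) : Int) + 1) + 1 := by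
        push_cast; ring
      rw [hc, h]
    dsimp only at hlen hget ⊢
    rw [hsplit, List.foldl_append]
    set dpm := (PySem.List.pyRange 3 (((m + 2 : Nat) : Int) + 1) 1).foldl (fun dp i =>
      PySem.List.pySetD dp i
        (max (PySem.List.pyGetD dp (i - 2) 0 + PySem.List.pyGetD stairs i 0)
             (PySem.List.pyGetD dp (i - 3) 0 + PySem.List.pyGetD stairs (i - 1) 0
              + PySem.List.pyGetD stairs i 0)))
      (PySem.List.pySetD
        (PySem.List.pySetD (PySem.List.pyRepeat [(0 : Int)] (n + 1)) 1 (PySem.List.pyGetD stairs 1 0)) 2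
        (PySem.List.pyGetD stairs 1 0 + PySem.List.pyGetD stairs 2 0)) with hdpm
    rw [List.foldl_cons, List.foldl_nil]
    have h2 : (((m + 2 : Nat) : Int) + 1) - 2 = ((m + 1 : Nat) : Int) := by push_cast; ring
    have h3 : (((m + 2 : Nat) : Int) + 1) - 3 = ((m : Nat) : Int) := by push_cast; ring
    have h1 : (((m + 2 : Nat) : Int) + 1) - 1 = ((m + 2 : Nat) : Int) := by push_cast; ring
    have hi : (((m + 2 : Nat) : Int) + 1) = ((m + 3 : Nat) : Int) := by push_cast; ring
    rw [h2, h3, h1, hi]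
    have hg1 : PySem.List.pyGetD dpm ((m + 1 : Nat) : Int) 0 = fRef stairs (m + 1) := by
      rw [PySem.List.pyGetD_natCast, List.getD_eq_getElem?_getD, hget (m + 1) (by omega)]
      rfl
    have hg0 : PySem.List.pyGetD dpm ((m : Nat) : Int) 0 = fRef stairs m := by
      rw [PySem.List.pyGetD_natCast, List.getD_eq_getElem?_getD, hget m (by omega)]
      rfl
    have hrec : fRef stairs (m + 3) = max (fRef stairs (m + 1) + sAt stairs (m + 3))
        (fRef stairs m + sAt stairs (m + 2) + sAt stairs (m + 3)) := by rw [fRef]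
    rw [hg1, hg0, PySem.List.pySetD_natCast]
    have hval : max (fRef stairs (m + 1) + PySem.List.pyGetD stairs ((m + 3 : Nat) : Int) 0)
        (fRef stairs m + PySem.List.pyGetD stairs ((m + 2 : Nat) : Int) 0
          + PySem.List.pyGetD stairs ((m + 3 : Nat) : Int) 0) = fRef stairs (m + 3) := by
      rw [hrec]; rfl
    rw [hval]
    push_cast at hm
    have hlt : m + 3 < dpm.length := by omega
    refine ⟨by simp [hlen], ?_⟩
    intro j hj
    by_cases hje : j = m + 3
    · subst hje
      rw [List.getElem?_set_eq_of_lt _ hlt]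
    · rw [List.getElem?_set_of_lt' _ dpm hlt, if_neg (by omega)]
      exact hget j (by omega)

-- ===== VERDICT (by name: the statement is the Claim_ definition above) =====
theorem solve_stair_climbing_spec : Claim_equal_solve_stair_climbing := by
  intro n stairs _ hPre
  unfold Spec_solve_stair_climbing
  by_cases h1 : n = 1
  · rw [solve_stair_climbing, solve_stair_climbing_alt, if_pos h1, if_pos h1]
  · have hn : 2 ≤ n := by
      rcases hPre with ⟨h, _⟩ | ⟨h, _⟩
      · exact absurd h h1
      · exact h
    obtain ⟨m, hm⟩ : ∃ m : Nat, ((m + 2 : Nat) : Int) = n := ⟨(n - 2).toNat, by push_cast; omega⟩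
    -- B side: the work-stack loop resolves n to fRef (m+2)
    set memo0 : PySem.Dict Int Int := ((PySem.Dict.empty.insert (0 : Int) (0 : Int)).insert 1
      (PySem.List.pyGetD stairs 1 0)).insert 2
      (PySem.List.pyGetD stairs 1 0 + PySem.List.pyGetD stairs 2 0) with hmemo0
    have hinv0 : InvB stairs memo0 := by
      refine ⟨?_, ?_, ?_, ?_, ?_⟩
      · exact PySem.Dict.nodup_keys_insert _ _ _ (PySem.Dict.nodup_keys_insert _ _ _
          (PySem.Dict.nodup_keys_insert _ _ _ PySem.Dict.nodup_keys_empty))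
      · simp [hmemo0, PySem.Dict.contains_insert]
      · simp [hmemo0, PySem.Dict.contains_insert]
      · simp [hmemo0]
      · intro j v hv
        rw [hmemo0] at hv
        rw [PySem.Dict.get?_insert] at hv
        by_cases hj2 : j = 2
        · refine ⟨2, by exact_mod_cast hj2, ?_⟩
          rw [if_pos hj2] at hv
          injection hv with h
          rw [← h]
          simp [fRef, sAt]
        · rw [if_neg hj2, PySem.Dict.get?_insert] at hv
          by_cases hj1 : j = 1
          · refine ⟨1, by exact_mod_cast hj1, ?_⟩
            rw [if_pos hj1] at hv
            injection hv with h
            rw [← h]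
            simp [fRef, sAt]
          · rw [if_neg hj1, PySem.Dict.get?_insert] at hv
            by_cases hj0 : j = 0
            · refine ⟨0, by exact_mod_cast hj0, ?_⟩
              rw [if_pos hj0] at hv
              injection hv with h
              rw [← h]
              simp [fRef]
            · rw [if_neg hj0, PySem.Dict.get?_empty] at hv
              exact absurd hv (by simp)
    obtain ⟨k, m', hstep, hinv, hcont, hmono, hsub, hbd, hsz⟩ := resolveB stairs (m + 2) memo0 hinv0
    -- memo0 has exactly the three base entries
    have hsz0 : memo0.size = 3 := by
      rw [hmemo0]
      rw [PySem.Dict.size_insert, PySem.Dict.size_insert, PySem.Dict.size_insert]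
      simp [PySem.Dict.contains_insert, PySem.Dict.contains_empty, PySem.Dict.size_empty]
    -- every key of m' lies in [0, m+2], so m'.size ≤ m+3
    have hkeys : ∀ j ∈ m'.keys, 0 ≤ j ∧ j ≤ ((m + 2 : Nat) : Int) := by
      intro j hj
      have hcj : m'.contains j = true := (PySem.Dict.contains_iff_mem_keys _ _).mpr hj
      rcases hsub j hcj with h | h
      · rw [hmemo0, PySem.Dict.contains_insert, PySem.Dict.contains_insert,
          PySem.Dict.contains_insert, PySem.Dict.contains_empty] at h
        simp only [Bool.or_eq_true, beq_iff_eq, Bool.false_eq_true, or_false] at h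
        rcases h with h | h | h <;> (subst h; constructor <;> [omega; (push_cast; omega)])
      · exact h
    have hszkeys : m'.size = m'.keys.length := by
      simp [PySem.Dict.size, PySem.Dict.keys]
    have hszle : m'.size ≤ m + 3 := by
      rw [hszkeys]
      exact nodup_length_le m'.keys (m + 2) hinv.1 hkeys
    have hk : k ≤ 4 * m + 1 := by
      rw [hsz0] at hbd
      omega
    -- fuel sufficiency
    have hfuel : (4 * (((m + 2 : Nat) : Int) + 1) + 8).toNat = 4 * m + 20 := by
      push_cast
      omega
    rw [solve_stair_climbing_alt, if_neg h1, ← hm]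
    dsimp only
    rw [← hmemo0, hfuel]
    have hrun : runB stairs (4 * m + 20) memo0 [((m + 2 : Nat) : Int)] = m' := by
      have : 4 * m + 20 = k + (4 * m + 20 - k) := by omega
      rw [this, hstep, runB_nil]
    rw [hrun]
    -- m'[n] = fRef (m+2)
    obtain ⟨v, hv⟩ := contains_some hcont
    obtain ⟨jn, hjn, hvv⟩ := hinv.2.2.2.2 _ _ hv
    have hjn' : jn = m + 2 := by exact_mod_cast hjn.symm
    subst hjn'
    have hB : m'.getD ((m + 2 : Nat) : Int) 0 = fRef stairs (m + 2) := by
      rw [PySem.Dict.getD_eq_get?_getD, hv, hvv]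
      rfl
    rw [hB]
    -- A side
    have hnge : 2 ≤ ((m + 2 : Nat) : Int) := by rw [hm]; exact hn
    rw [solve_stair_climbing, if_neg (by rw [hm]; exact h1)]
    dsimp only
    obtain ⟨hlen, hget⟩ := aLoop stairs ((m + 2 : Nat) : Int) hnge m le_rfl
    rw [PySem.List.pyGetD_natCast, List.getD_eq_getElem?_getD, hget (m + 2) le_rfl]
    rfl
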